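-- pv_equiv track=rewrite | github.com/AngikarGhosal/bicliques-partition-research | older_files/3DKDKD/utils.py | obtain_expand_set_bicliques
-- ===== SOURCE A (Python) =====
-- def obtain_expand_set_bicliques(biclique_tuple):
--     set_of_new_bicliques=set()
--     list_of_first_nodes=list_of_nodes_from_string(biclique_tuple[0])
--     list_of_second_nodes=list_of_nodes_from_string(biclique_tuple[1])
--     list_of_first_lists=[[]]
--     list_of_second_lists=[[]]
--     for el in list_of_first_nodes:
--         list_of_first_lists+= [s+[el] for s in list_of_first_lists]
--     for el in list_of_second_nodes:
--         list_of_second_lists+=[s+[el] for s in list_of_second_lists]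
--     list_of_first_lists.remove([])
--     list_of_second_lists.remove([])
--     for x in list_of_first_lists:
--         for y in list_of_second_lists:
--             xstr=' '.join(x)
--             ystr=' '.join(y)
--             set_of_new_bicliques.add((xstr,ystr))
--     return set_of_new_bicliques
--
-- def list_of_nodes_from_string(nodes_string):
--     list_of_nodes=nodes_string.split(" ")
--     return list_of_nodes
-- ===== SOURCE B (Python) =====
-- def subset_strings(nodes):
--     n = len(nodes)
--     return [' '.join([nodes[i] for i in range(n) if (m >> i) & 1])
--             for m in range(1, 1 << n)]
--
-- def obtain_expand_set_bicliques(biclique_tuple):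
--     xs = subset_strings(biclique_tuple[0].split(" "))
--     ys = subset_strings(biclique_tuple[1].split(" "))
--     out = set()
--     for xstr in xs:
--         for ystr in ys:
--             out.add((xstr, ystr))
--     return out
-- ===== Notes on version B (the rewrite author's own statement) =====
-- stated objective: idiomatic
-- what changed: Subsets are generated by bitmask index selection (mask 1..2^n-1 picking nodes[i] when bit i is set, joined immediately), instead of incrementally doubling a maintained list-of-lists and removing the empty subset afterwards.
import Mathlib
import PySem

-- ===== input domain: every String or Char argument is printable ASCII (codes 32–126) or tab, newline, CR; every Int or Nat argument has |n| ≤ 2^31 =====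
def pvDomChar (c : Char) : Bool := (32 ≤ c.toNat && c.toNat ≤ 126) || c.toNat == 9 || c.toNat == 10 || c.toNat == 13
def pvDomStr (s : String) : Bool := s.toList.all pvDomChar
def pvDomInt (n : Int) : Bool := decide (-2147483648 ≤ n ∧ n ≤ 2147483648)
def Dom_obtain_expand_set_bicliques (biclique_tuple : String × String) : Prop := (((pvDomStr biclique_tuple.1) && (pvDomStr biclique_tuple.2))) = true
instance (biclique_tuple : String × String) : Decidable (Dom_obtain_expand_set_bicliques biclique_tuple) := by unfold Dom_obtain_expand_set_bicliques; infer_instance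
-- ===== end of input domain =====

-- B generates each non-empty subset by bitmask index selection instead of A's incremental
-- list-of-lists doubling; same cost, more idiomatic ('faster' not claimed).

-- ===== PORT A =====
-- list_of_nodes_from_string(nodes_string): nodes_string.split(" ")
def pvNodes (nodes_string : String) : List String := (PySem.Str.split? nodes_string " ").getD []  -- split? is none only for sep = ""; sep here is " "

def obtain_expand_set_bicliques (biclique_tuple : String × String) : List (String × String) :=
  let list_of_first_nodes := pvNodes biclique_tuple.1
  let list_of_second_nodes := pvNodes biclique_tuple.2
  let list_of_first_lists :=
    list_of_first_nodes.foldl (fun acc el => acc ++ acc.map (fun s => s ++ [el])) [([] : List String)]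
  let list_of_second_lists :=
    list_of_second_nodes.foldl (fun acc el => acc ++ acc.map (fun s => s ++ [el])) [([] : List String)]
  -- .remove([]) never raises here: [] is always the first element of the doubled list
  let list_of_first_lists := (PySem.List.remove? list_of_first_lists []).getD []
  let list_of_second_lists := (PySem.List.remove? list_of_second_lists []).getD []
  list_of_first_lists.foldl (fun st x =>
    list_of_second_lists.foldl (fun st y =>
      PySem.Set.add st (PySem.Str.join " " x, PySem.Str.join " " y)) st)
    (PySem.Set.empty : PySem.Set (String × String))

-- ===== PORT B =====
-- m >> i for a nonnegative Python shift amount i (as a Nat)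
def pvShr (m i : Int) : Int := m >>> i.toNat

-- subset_strings(nodes): [' '.join([nodes[i] for i in range(n) if (m >> i) & 1]) for m in range(1, 1 << n)]
def pvSubsetStrings (nodes : List String) : List String :=
  let n := nodes.length
  (PySem.List.pyRange 1 ((1 : Int) <<< n) 1).map (fun m =>
    PySem.Str.join " "
      (((PySem.List.pyRange 0 (n : Int) 1).filter
          (fun i => PySem.Int.band (pvShr m i) 1 != 0)).map
        (fun i => PySem.List.pyGetD nodes i "")))

def obtain_expand_set_bicliques_alt (biclique_tuple : String × String) : List (String × String) :=
  let xs := pvSubsetStrings ((PySem.Str.split? biclique_tuple.1 " ").getD [])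
  let ys := pvSubsetStrings ((PySem.Str.split? biclique_tuple.2 " ").getD [])
  xs.foldl (fun out xstr =>
    ys.foldl (fun out ystr => PySem.Set.add out (xstr, ystr)) out)
    (PySem.Set.empty : PySem.Set (String × String))

-- ===== PRECONDITION & SPEC =====
def Spec_obtain_expand_set_bicliques (biclique_tuple : String × String) (out : List (String × String)) : Prop := out = obtain_expand_set_bicliques_alt biclique_tuple
instance (biclique_tuple : String × String) (out : List (String × String)) : Decidable (Spec_obtain_expand_set_bicliques biclique_tuple out) := by unfold Spec_obtain_expand_set_bicliques; infer_instance

-- ===== CLAIM (what is proved, stated in full; the proofs are below) =====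
def Claim_equal_obtain_expand_set_bicliques : Prop := ∀ (biclique_tuple : String × String), Dom_obtain_expand_set_bicliques biclique_tuple → Spec_obtain_expand_set_bicliques biclique_tuple (obtain_expand_set_bicliques biclique_tuple)

-- ===== LEMMAS AND PROOFS =====

-- the subsets of `nodes`, in A's doubling order (= mask order, bit i ↔ nodes[i])
def pvSubs : List String → List (List String)
  | [] => [[]]
  | e :: rest => (pvSubs rest).flatMap (fun t => [t, e :: t])

-- the subset selected by mask k
def pvMaskSub : List String → Nat → List String
  | [], _ => []
  | e :: rest, k => (if k % 2 = 1 then [e] else []) ++ pvMaskSub rest (k / 2)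

theorem pv_foldl_doubling (nodes : List String) (a : List (List String)) :
    nodes.foldl (fun acc el => acc ++ acc.map (fun s => s ++ [el])) a
      = (pvSubs nodes).flatMap (fun t => a.map (fun s => s ++ t)) := by
  induction nodes generalizing a with
  | nil => simp [pvSubs]
  | cons e rest ih =>
    simp only [List.foldl_cons, ih, pvSubs, List.flatMap_assoc]
    apply List.flatMap_congr
    intro t _
    simp [List.map_append, List.append_assoc]

theorem pv_range_two_mul (N : Nat) :
    List.range (2 * N) = (List.range N).flatMap (fun j => [2 * j, 2 * j + 1]) := by
  induction N with
  | zero => simp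
  | succ n ih =>
    have h1 : 2 * (n + 1) = (2 * n + 1) + 1 := by ring
    rw [h1, List.range_succ, List.range_succ, ih, List.range_succ]
    simp [List.flatMap_append]

theorem pv_subs_eq_map_range (nodes : List String) :
    pvSubs nodes = (List.range (2 ^ nodes.length)).map (pvMaskSub nodes) := by
  induction nodes with
  | nil => simp [pvSubs, pvMaskSub]
  | cons e rest ih =>
    have h2 : 2 ^ (e :: rest).length = 2 * 2 ^ rest.length := by
      simp [List.length_cons, pow_succ]; ring
    rw [pvSubs, ih, h2, pv_range_two_mul, List.flatMap_map, List.map_flatMap]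
    apply List.flatMap_congr
    intro j _
    have ha : pvMaskSub (e :: rest) (2 * j) = pvMaskSub rest j := by
      simp [pvMaskSub, Nat.mul_mod_right]
    have hb : pvMaskSub (e :: rest) (2 * j + 1) = e :: pvMaskSub rest j := by
      have : (2 * j + 1) / 2 = j := by omega
      simp [pvMaskSub, this]
    simp [ha, hb]

theorem pv_maskSub_zero (nodes : List String) : pvMaskSub nodes 0 = [] := by
  induction nodes with
  | nil => rfl
  | cons e rest ih => simp [pvMaskSub, ih]

-- A's doubled list is [] followed by the mask-(k+1) subsets
theorem pv_subs_cons (nodes : List String) :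
    pvSubs nodes = [] :: (List.range (2 ^ nodes.length - 1)).map (fun k => pvMaskSub nodes (k + 1)) := by
  have h : 2 ^ nodes.length = (2 ^ nodes.length - 1) + 1 :=
    (Nat.sub_add_cancel Nat.one_le_two_pow).symm
  rw [pv_subs_eq_map_range, h, List.range_succ_eq_map]
  simp [pv_maskSub_zero, Function.comp]

-- the bitmask comprehension of B computes pvMaskSub (Nat level)
theorem pv_mask_sel_nat (nodes : List String) (j : Nat) :
    (((List.range nodes.length).filter (fun k => decide ((j >>> k) % 2 = 1))).map
      (fun k => nodes.getD k "")) = pvMaskSub nodes j := by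
  induction nodes generalizing j with
  | nil => simp [pvMaskSub]
  | cons e rest ih =>
    have hsh : ∀ k : Nat, j >>> (k + 1) = (j / 2) >>> k := by
      intro k; rw [Nat.add_comm, Nat.shiftRight_add, Nat.shiftRight_one]
    have hrest : ((((List.range rest.length).map Nat.succ).filter
          (fun k => decide ((j >>> k) % 2 = 1))).map (fun k => (e :: rest).getD k ""))
        = pvMaskSub rest (j / 2) := by
      rw [List.filter_map, List.map_map, ← ih (j / 2)]
      simp only [Function.comp_def, Nat.succ_eq_add_one, hsh, List.getD_cons_succ]
    rw [List.length_cons, List.range_succ_eq_map, List.filter_cons]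
    have h0 : (decide ((j >>> 0) % 2 = 1)) = decide (j % 2 = 1) := by
      rw [Nat.shiftRight_zero]
    rw [h0]
    by_cases h : j % 2 = 1
    · rw [if_pos (by simpa using h), List.map_cons, hrest, List.getD_cons_zero]
      conv_rhs => rw [pvMaskSub]
      rw [if_pos h, List.singleton_append]
    · rw [if_neg (by simpa using h), hrest]
      conv_rhs => rw [pvMaskSub]
      rw [if_neg h, List.nil_append]

-- the bitmask comprehension of B computes pvMaskSub (as written in the port)
theorem pv_mask_sel (nodes : List String) (j : Nat) :
    (((PySem.List.pyRange 0 (nodes.length : Int) 1).filter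
        (fun i => PySem.Int.band (pvShr ((j : Nat) : Int) i) 1 != 0)).map
      (fun i => PySem.List.pyGetD nodes i "")) = pvMaskSub nodes j := by
  have hpred : ((fun i : Int => PySem.Int.band (pvShr ((j : Nat) : Int) i) 1 != 0) ∘
        (fun k : Nat => (k : Int))) = fun k : Nat => decide ((j >>> k) % 2 = 1) := by
    funext k
    simp only [Function.comp_apply, pvShr, Int.toNat_natCast]
    rw [← Int.natCast_shiftRight, show (1 : Int) = ((1 : Nat) : Int) from rfl,
      PySem.Int.band_natCast]
    simp only [Nat.and_one_is_mod]
    generalize j >>> k = m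
    by_cases h : m % 2 = 1 <;> simp [h] <;> omega
  have hget : ((fun i : Int => PySem.List.pyGetD nodes i "") ∘ (fun k : Nat => (k : Int)))
      = fun k : Nat => nodes.getD k "" := by
    funext k
    simp [PySem.List.pyGetD_natCast]
  rw [PySem.List.pyRange_zero_nat, List.filter_map, hpred, List.map_map, hget]
  exact pv_mask_sel_nat nodes j

theorem pv_subsetStrings_eq (nodes : List String) :
    pvSubsetStrings nodes = ((pvSubs nodes).drop 1).map (PySem.Str.join " ") := by
  have h2 : ((1 : Int) <<< nodes.length) = ((2 ^ nodes.length : Nat) : Int) := by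
    rw [Int.shiftLeft_eq]; push_cast; ring
  have h3 : (((2 ^ nodes.length : Nat) : Int) - 1).toNat = 2 ^ nodes.length - 1 := by
    have h1 : 1 ≤ 2 ^ nodes.length := Nat.one_le_two_pow
    rw [show ((1 : Int)) = ((1 : Nat) : Int) from rfl, ← Nat.cast_sub h1, Int.toNat_natCast]
  have h4 : PySem.List.pyRange 1 ((1 : Int) <<< nodes.length) 1
      = (List.range (2 ^ nodes.length - 1)).map (fun (k : Nat) => 1 + (k : Int)) := by
    rw [h2, PySem.List.pyRange_one, h3]
  rw [pvSubsetStrings]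
  rw [pv_subs_cons, List.drop_one, List.tail_cons, h4, List.map_map, List.map_map]
  apply List.map_congr_left
  intro k _
  have hc : (1 + (k : Int)) = (((k + 1 : Nat)) : Int) := by push_cast; ring
  simp only [Function.comp_def, hc, pv_mask_sel]

-- A's doubling from [[]] builds exactly the subset list
theorem pv_foldl_doubling' (nodes : List String) :
    nodes.foldl (fun acc el => acc ++ acc.map (fun s => s ++ [el])) [([] : List String)]
      = pvSubs nodes := by
  rw [pv_foldl_doubling]
  simp

-- ===== VERDICT (by name: the statement is the Claim_ definition above) =====
theorem obtain_expand_set_bicliques_spec : Claim_equal_obtain_expand_set_bicliques := by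
  intro bt _
  unfold Spec_obtain_expand_set_bicliques
  simp only [obtain_expand_set_bicliques, obtain_expand_set_bicliques_alt, pvNodes,
    pv_foldl_doubling', pv_subsetStrings_eq]
  rw [pv_subs_cons ((PySem.Str.split? bt.1 " ").getD []),
    pv_subs_cons ((PySem.Str.split? bt.2 " ").getD [])]
  simp only [PySem.List.remove?_cons_self, Option.getD_some, List.drop_one, List.tail_cons,
    List.foldl_map]
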